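-- pv_equiv track=rewrite | github.com/itsallaboutgo/BIS-346-446-normuradovmalik | Assignment 3/Exercise 5.11.py | summarize_letters
-- ===== SOURCE A (Python) =====
-- def summarize_letters(string):
--     #Initializing a empty dictionary
--     character_counter = {}
--     #converting all the characters to lowercase
--     string_lower = string.lower()
--     for i in string_lower:
--         #checking if the charter presents in the dictionery then increase it by one and also to check if the character is alphabetic
--         if i in character_counter and i.isalpha():
--             character_counter[i] = character_counter[i]+1
--         #checking if the character not present in the dictionary then assign 1
--         if i not in character_counter and i.isalpha():
--             character_counter[i] = 1
--     #converting the dictionary to list of tuples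
--     list_of_tuples = [(k, v) for k, v in character_counter.items()]
--     return list_of_tuples
-- ===== SOURCE B (Python) =====
-- def summarize_letters(string):
--     def group(letters):
--         if not letters:
--             return []
--         c = letters[0]
--         rest = [x for x in letters if x != c]
--         return [(c, len(letters) - len(rest))] + group(rest)
--     return group([c for c in string.lower() if c.isalpha()])
-- ===== Notes on version B (the rewrite author's own statement) =====
-- stated objective: alternative
-- what changed: Replaces the dict of running counts with a recursive partition-and-remove scheme: take the first remaining letter, derive its count as the length drop after removing all its occurrences, and recurse on the shrunken list; no counter structure is maintained at all.
import Mathlib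
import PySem

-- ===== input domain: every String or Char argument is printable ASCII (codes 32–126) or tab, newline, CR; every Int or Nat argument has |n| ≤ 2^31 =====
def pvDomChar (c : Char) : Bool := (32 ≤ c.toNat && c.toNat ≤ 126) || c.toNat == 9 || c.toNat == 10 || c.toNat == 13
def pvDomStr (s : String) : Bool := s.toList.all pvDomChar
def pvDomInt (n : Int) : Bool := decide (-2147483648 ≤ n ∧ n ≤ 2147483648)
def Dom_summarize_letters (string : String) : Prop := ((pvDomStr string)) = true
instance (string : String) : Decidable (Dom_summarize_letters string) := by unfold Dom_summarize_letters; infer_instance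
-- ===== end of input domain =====

-- B: recursive partition-and-remove (count = length drop after removing the first letter's occurrences) instead of a dict of running counts; alternative decomposition, same results.
-- ===== PORT A =====
def summarize_letters (string : String) : List (String × Int) :=
  let character_counter : PySem.Dict Char Int := PySem.Dict.empty
  let string_lower := (PySem.Str.lower string).toList
  let d := string_lower.foldl (fun d i =>
    let d := if d.contains i && PySem.Chars.isalpha i then d.insert i (d.getD i 0 + 1) else d
    if !d.contains i && PySem.Chars.isalpha i then d.insert i 1 else d) character_counter
  -- Python dict keys are 1-char strings; the dict is kept over Char and keys rendered when the tuples are built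
  d.items.map (fun kv => (String.singleton kv.1, kv.2))

-- ===== PORT B =====
-- helper 'group' of Source B: recursion on the list of alphabetic characters
def pvGroup : List Char → List (String × Int)
  | [] => []
  | c :: t =>
    let rest := (c :: t).filter (fun x => !(x == c))
    (String.singleton c, ((c :: t).length : Int) - (rest.length : Int)) :: pvGroup rest
termination_by l => l.length
decreasing_by
  simp only [List.filter, beq_self_eq_true, Bool.not_true]
  exact Nat.lt_succ_of_le (List.length_filter_le _ _)

def summarize_letters_alt (string : String) : List (String × Int) :=
  pvGroup (((PySem.Str.lower string).toList).filter PySem.Chars.isalpha)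

-- ===== PRECONDITION & SPEC =====
def Spec_summarize_letters (string : String) (out : List (String × Int)) : Prop := out = summarize_letters_alt string
instance (string : String) (out : List (String × Int)) : Decidable (Spec_summarize_letters string out) := by unfold Spec_summarize_letters; infer_instance

-- ===== CLAIM (what is proved, stated in full; the proofs are below) =====
def Claim_equal_summarize_letters : Prop := ∀ (string : String), Dom_summarize_letters string → Spec_summarize_letters string (summarize_letters string)

-- ===== LEMMAS AND PROOFS =====

-- A's fused two-if loop body is the standard counter increment
lemma step_eq (d : PySem.Dict Char Int) (c : Char) :
    (let d1 := if d.contains c && PySem.Chars.isalpha c then d.insert c (d.getD c 0 + 1) else d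
     if !d1.contains c && PySem.Chars.isalpha c then d1.insert c 1 else d1)
    = if PySem.Chars.isalpha c then d.insert c (d.getD c 0 + 1) else d := by
  by_cases ha : PySem.Chars.isalpha c
  · by_cases hc : d.contains c
    · simp [ha, hc, PySem.Dict.contains_insert_self]
    · have h0 : d.getD c 0 = 0 := by
        rw [PySem.Dict.getD_eq_get?_getD]
        simp [(PySem.Dict.get?_eq_none_iff_contains d c).2 (by simpa using hc)]
      simp [ha, hc, h0]
  · simp [ha]

lemma add_cons_of_ne {α : Type} [BEq α] [LawfulBEq α] (c : α) (s : List α) (x : α) (hx : x ≠ c) :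
    PySem.Set.add (c :: s) x = c :: PySem.Set.add s x := by
  simp only [PySem.Set.add, PySem.Set.contains, List.contains_cons,
    beq_eq_false_iff_ne.mpr hx, Bool.false_or]
  split <;> simp

lemma foldl_add_cons {α : Type} [BEq α] [LawfulBEq α] (c : α) (t : List α)
    (h : ∀ x ∈ t, x ≠ c) (s : List α) :
    t.foldl PySem.Set.add (c :: s) = c :: t.foldl PySem.Set.add s := by
  induction t generalizing s with
  | nil => rfl
  | cons x t ih =>
    simp only [List.foldl_cons]
    rw [add_cons_of_ne c s x (h x (by simp))]
    exact ih (fun y hy => h y (by simp [hy])) _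

lemma foldl_add_skip {α : Type} [BEq α] [LawfulBEq α] (c : α) (t : List α) (acc : List α)
    (hc : c ∈ acc) :
    t.foldl PySem.Set.add acc = (t.filter (fun x => !(x == c))).foldl PySem.Set.add acc := by
  induction t generalizing acc with
  | nil => rfl
  | cons x t ih =>
    by_cases hx : x = c
    · subst hx
      have hadd : PySem.Set.add acc x = acc := by
        simp [PySem.Set.add, PySem.Set.contains, hc]
      simp only [List.foldl_cons, List.filter_cons, beq_self_eq_true, Bool.not_true, hadd]
      exact ih acc hc
    · simp only [List.foldl_cons, List.filter_cons, beq_eq_false_iff_ne.mpr hx, Bool.not_false]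
      refine ih _ ?_
      simp only [PySem.Set.add]
      split <;> simp [hc]


lemma ofList_cons_filter {α : Type} [BEq α] [LawfulBEq α] (c : α) (t : List α) :
    PySem.Set.ofList (c :: t) = c :: PySem.Set.ofList (t.filter (fun x => !(x == c))) := by
  have h1 : PySem.Set.add PySem.Set.empty c = [c] := rfl
  simp only [PySem.Set.ofList, List.foldl_cons, h1]
  rw [foldl_add_skip c t [c] (by simp)]
  exact foldl_add_cons c _ (fun x hx => by simpa using (List.of_mem_filter hx)) []

lemma pvGroup_eq (l : List Char) :
    pvGroup l = (PySem.Set.ofList l).map (fun c => (String.singleton c, (l.count c : Int))) := by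
  induction l using pvGroup.induct with
  | case1 => simp [pvGroup]
  | case2 c t rest ih =>
    have hrest : (c :: t).filter (fun x => !(x == c)) = t.filter (fun x => !(x == c)) := by
      simp
    have ih' : pvGroup (t.filter (fun x => !(x == c)))
        = (PySem.Set.ofList (t.filter (fun x => !(x == c)))).map
            (fun d => (String.singleton d, ((t.filter (fun x => !(x == c))).count d : Int))) := by
      have : rest = t.filter (fun x => !(x == c)) := by simp [rest]
      rw [this] at ih; exact ih
    rw [pvGroup]
    simp only [hrest]
    rw [ofList_cons_filter]
    refine congrArg₂ List.cons ?_ ?_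
    · have hA : (c :: t).count c + (t.filter (fun x => !(x == c))).length = (c :: t).length := by
        have h2 := List.length_eq_countP_add_countP (p := fun x => x == c) (l := c :: t)
        have h3 : (t.filter (fun x => !(x == c))).length
            = List.countP (fun x => !(x == c)) (c :: t) := by
          rw [← hrest]; exact List.countP_eq_length_filter.symm
        have h4 : List.countP (fun a => decide ¬(a == c) = true) (c :: t)
            = List.countP (fun x => !(x == c)) (c :: t) := by
          apply List.countP_congr; intro a _; simp
        simp only [List.count, h3, ← h4]
        omega
      simp only [Prod.mk.injEq, true_and]
      omega
    · rw [ih']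
      apply List.map_congr_left
      intro d hd
      have hdne : d ≠ c := by
        have := (PySem.Set.mem_ofList _ d).1 hd
        simpa using (List.of_mem_filter this)
      have hcnt : (t.filter (fun x => !(x == c))).count d = (c :: t).count d := by
        rw [List.count_filter (by simpa using hdne)]
        exact (List.count_cons_of_ne hdne.symm).symm
      simp [hcnt]

-- ===== VERDICT (by name: the statement is the Claim_ definition above) =====
theorem summarize_letters_spec : Claim_equal_summarize_letters := by
  intro s _
  unfold Spec_summarize_letters summarize_letters summarize_letters_alt
  simp only []
  rw [show (fun (d : PySem.Dict Char Int) i =>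
        let d1 := if d.contains i && PySem.Chars.isalpha i then d.insert i (d.getD i 0 + 1) else d
        if !d1.contains i && PySem.Chars.isalpha i then d1.insert i 1 else d1)
      = (fun d i => if PySem.Chars.isalpha i then d.insert i (d.getD i 0 + 1) else d)
      from funext fun d => funext fun c => step_eq d c]
  rw [← List.foldl_filter, PySem.Dict.foldl_insert_getD_add_one_eq_counter,
      PySem.Dict.items_counter, pvGroup_eq, List.map_map]
  rfl
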